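-- pv_equiv track=rewrite | github.com/has-ctrl/advent-of-code-2023 | days/14.py | _calculate_load_dynamic
-- ===== SOURCE A (Python) =====
-- def _calculate_load_dynamic(platform: list[str]) -> int:
--     total = 0
--     for vertical in platform:
--         increment = 0
--         for i, c in enumerate(vertical):
--             load = len(vertical) - i
--             match c:
--                 case ".":
--                     increment += 1
--                 case "O":
--                     total += load + increment
--                 case "#":
--                     increment = 0
--     return total
-- ===== SOURCE B (Python) =====
-- def _calculate_load_dynamic(platform: list[str]) -> int:
--     # Group each column by '#'-walls: within a segment each rock's load is
--     # (load at segment start) minus (non-'.' chars before it in the segment).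
--     total = 0
--     for col in platform:
--         top = len(col)  # load value of the current segment's first cell
--         for seg in col.split("#"):
--             b = 0  # non-'.' chars seen so far in this segment
--             for c in seg:
--                 if c != ".":
--                     if c == "O":
--                         total += top - b
--                     b += 1
--             top -= len(seg) + 1
--     return total
-- ===== Notes on version B (the rewrite author's own statement) =====
-- stated objective: alternative
-- what changed: Replaced A's per-index forward scan (enumerate with a running count of dots since the last '#', adding load+count at each 'O') by splitting each column on '#' walls and, per segment, charging each rock the segment-start load minus the number of non-'.' characters before it in the segment.
import Mathlib
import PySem

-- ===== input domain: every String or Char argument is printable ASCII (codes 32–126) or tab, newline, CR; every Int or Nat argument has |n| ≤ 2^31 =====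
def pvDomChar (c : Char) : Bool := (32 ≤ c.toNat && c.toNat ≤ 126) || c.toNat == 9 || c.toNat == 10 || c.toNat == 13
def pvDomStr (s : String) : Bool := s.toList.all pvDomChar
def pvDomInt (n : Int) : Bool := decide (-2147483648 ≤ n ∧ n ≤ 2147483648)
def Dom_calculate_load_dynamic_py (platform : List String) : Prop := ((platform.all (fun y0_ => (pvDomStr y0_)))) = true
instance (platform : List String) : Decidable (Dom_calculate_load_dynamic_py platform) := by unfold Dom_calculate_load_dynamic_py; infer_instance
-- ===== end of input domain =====

-- B groups each column by '#'-walls (column.split('#')) and charges each rock the segment-start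
-- load minus the count of non-'.' chars before it in its segment, instead of A's per-index scan
-- that counts dots since the last wall; objective: alternative decomposition.

-- ===== PORT A =====
-- forward scan per column: increment = dots since last '#'; 'O' adds load + increment
def calculate_load_dynamic_py (platform : List String) : Int :=
  platform.foldl (fun total vertical =>
    ((PySem.List.enumerate vertical.toList).foldl (fun (st : Int × Int) ic =>
        let load : Int := PySem.Str.len vertical - ic.1
        if ic.2 = '.' then (st.1, st.2 + 1)
        else if ic.2 = 'O' then (st.1 + load + st.2, st.2)
        else if ic.2 = '#' then (st.1, 0)
        else st)
      (total, 0)).1) 0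

-- ===== PORT B =====
-- split the column on '#'; per segment, b counts non-'.' chars, each 'O' adds top - b;
-- top (the load of the segment's first cell) drops by len(seg)+1 from segment to segment
def calculate_load_dynamic_py_alt (platform : List String) : Int :=
  platform.foldl (fun total col =>
    (((PySem.Str.split? col "#").getD []).foldl (fun (st : Int × Int) seg =>
        let p := seg.toList.foldl (fun (p : Int × Int) c =>
            if c ≠ '.' then
              (if c = 'O' then (p.1 + (st.2 - p.2), p.2 + 1) else (p.1, p.2 + 1))
            else p)
          (st.1, 0)
        (p.1, st.2 - (PySem.Str.len seg + 1)))
      (total, PySem.Str.len col)).1) 0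

-- ===== PRECONDITION & SPEC =====
def Spec_calculate_load_dynamic_py (platform : List String) (out : Int) : Prop := out = calculate_load_dynamic_py_alt platform
instance (platform : List String) (out : Int) : Decidable (Spec_calculate_load_dynamic_py platform out) := by unfold Spec_calculate_load_dynamic_py; infer_instance

-- ===== CLAIM (what is proved, stated in full; the proofs are below) =====
def Claim_equal_calculate_load_dynamic_py : Prop := ∀ (platform : List String), Dom_calculate_load_dynamic_py platform → Spec_calculate_load_dynamic_py platform (calculate_load_dynamic_py platform)

-- ===== LEMMAS AND PROOFS =====

-- split on '#' as a plain structural recursion (cur = reversed current piece)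
def pvSplitAux : List Char → List Char → List (List Char)
  | cur, [] => [cur.reverse]
  | cur, c :: r => if c = '#' then cur.reverse :: pvSplitAux [] r else pvSplitAux (c :: cur) r

theorem pv_go (l : List Char) : ∀ (fuel : Nat) (cur : List Char) (acc : List (List Char)),
    l.length ≤ fuel →
    PySem.Chars.splitOn.go ['#'] fuel l cur acc = acc.reverse ++ pvSplitAux cur l := by
  induction l with
  | nil =>
    intro fuel cur acc _
    cases fuel <;> simp [PySem.Chars.splitOn.go, pvSplitAux]
  | cons c r ih =>
    intro fuel cur acc hf
    cases fuel with
    | zero => simp at hf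
    | succ f =>
      by_cases hc : c = '#'
      · subst hc
        simp only [PySem.Chars.splitOn.go, List.isPrefixOf, BEq.rfl, Bool.true_and,
          if_pos, List.drop_succ_cons, List.length_cons, List.length_nil, List.drop_zero]
        rw [ih f [] (cur.reverse :: acc) (by simpa using hf)]
        simp [pvSplitAux]
      · have hpre : (['#'].isPrefixOf (c :: r)) = false := by
          simp [List.isPrefixOf]; exact fun h => (hc h.symm).elim
        simp only [PySem.Chars.splitOn.go, hpre, Bool.false_eq_true, if_false]
        rw [ih f (c :: cur) acc (by simpa using hf)]
        simp [pvSplitAux, hc]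

theorem pv_splitOn (l : List Char) : PySem.Chars.splitOn l ['#'] = pvSplitAux [] l := by
  simpa using pv_go l (l.length + 1) [] [] (by omega)

-- reference value of A's scan: i = absolute index, inc = dots since last wall
def pvRef (n : Int) : Int → Int → List Char → Int
  | _, _, [] => 0
  | i, inc, c :: cs =>
    if c = '.' then pvRef n (i + 1) (inc + 1) cs
    else if c = 'O' then (n - i + inc) + pvRef n (i + 1) inc cs
    else if c = '#' then pvRef n (i + 1) 0 cs
    else pvRef n (i + 1) inc cs

-- reference value of B's scan: top = segment-start load, off = chars since wall, b = non-dots since wall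
def pvR : Int → Int → Int → List Char → Int
  | _, _, _, [] => 0
  | top, off, b, c :: cs =>
    if c = '.' then pvR top (off + 1) b cs
    else if c = 'O' then (top - b) + pvR top (off + 1) (b + 1) cs
    else if c = '#' then pvR (top - off - 1) 0 0 cs
    else pvR top (off + 1) (b + 1) cs

theorem pvA_fold (n : Int) (l : List Char) : ∀ (j t inc : Int),
    ((PySem.List.enumerate l j).foldl (fun (st : Int × Int) ic =>
        let load : Int := n - ic.1
        if ic.2 = '.' then (st.1, st.2 + 1)
        else if ic.2 = 'O' then (st.1 + load + st.2, st.2)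
        else if ic.2 = '#' then (st.1, 0)
        else st) (t, inc)).1
      = t + pvRef n j inc l := by
  induction l with
  | nil => intro j t inc; simp [PySem.List.enumerate_nil, pvRef]
  | cons c cs ih =>
    intro j t inc
    rw [PySem.List.enumerate_cons]
    by_cases h1 : c = '.' <;> by_cases h2 : c = 'O' <;> by_cases h3 : c = '#' <;>
      simp_all [pvRef, List.foldl_cons]; ring

-- the per-segment fold of B's port, with the state (total, top) threaded through segments
def pvSegs (segs : List (List Char)) (st : Int × Int) : Int × Int :=
  segs.foldl (fun st seg =>
    ((seg.foldl (fun (p : Int × Int) c =>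
        if c ≠ '.' then (if c = 'O' then (p.1 + (st.2 - p.2), p.2 + 1) else (p.1, p.2 + 1)) else p)
      (st.1, 0)).1, st.2 - ((seg.length : Int) + 1))) st

theorem pvB_fold (l : List Char) : ∀ (cur : List Char) (t top : Int),
    (pvSegs (pvSplitAux cur l) (t, top)).1
      = (cur.reverse.foldl (fun (p : Int × Int) c =>
          if c ≠ '.' then (if c = 'O' then (p.1 + (top - p.2), p.2 + 1) else (p.1, p.2 + 1)) else p) (t, 0)).1
        + pvR top cur.length ((cur.reverse.foldl (fun (p : Int × Int) c =>
          if c ≠ '.' then (if c = 'O' then (p.1 + (top - p.2), p.2 + 1) else (p.1, p.2 + 1)) else p) (t, 0)).2) l := by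
  induction l with
  | nil => intro cur t top; simp [pvSplitAux, pvSegs, pvR]
  | cons c cs ih =>
    intro cur t top
    by_cases h3 : c = '#'
    · subst h3
      simp only [pvSplitAux, if_pos, pvSegs, List.foldl_cons]
      have := ih [] ((cur.reverse.foldl (fun (p : Int × Int) c =>
          if c ≠ '.' then (if c = 'O' then (p.1 + (top - p.2), p.2 + 1) else (p.1, p.2 + 1)) else p) (t, 0)).1)
        (top - ((cur.reverse.length : Int) + 1))
      simp only [pvSegs] at this
      rw [this]
      simp [pvR, sub_sub]
    · simp only [pvSplitAux, if_neg h3]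
      rw [ih (c :: cur) t top]
      have hrev : (c :: cur).reverse = cur.reverse ++ [c] := by simp
      rw [hrev, List.foldl_append]
      set p := cur.reverse.foldl (fun (p : Int × Int) c =>
          if c ≠ '.' then (if c = 'O' then (p.1 + (top - p.2), p.2 + 1) else (p.1, p.2 + 1)) else p) (t, 0) with hp
      by_cases h1 : c = '.'
      · subst h1
        simp [pvR, List.foldl_cons]
      · by_cases h2 : c = 'O'
        · subst h2
          simp [pvR, List.foldl_cons]
          ring
        · simp [pvR, List.foldl_cons, h1, h2, h3]

theorem pv_bridge (n : Int) (l : List Char) : ∀ (i inc b : Int),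
    pvRef n i inc l = pvR (n - i + inc + b) (inc + b) b l := by
  induction l with
  | nil => intro i inc b; simp [pvRef, pvR]
  | cons c cs ih =>
    intro i inc b
    by_cases h1 : c = '.'
    · subst h1
      simp only [pvRef, pvR, if_pos]
      rw [ih (i + 1) (inc + 1) b]
      have e1 : n - (i + 1) + (inc + 1) + b = n - i + inc + b := by ring
      have e2 : inc + 1 + b = inc + b + 1 := by ring
      rw [e1, e2]
    · by_cases h2 : c = 'O'
      · subst h2
        simp only [pvRef, pvR, h1, if_false, if_pos]
        rw [ih (i + 1) inc (b + 1)]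
        have e1 : n - (i + 1) + inc + (b + 1) = n - i + inc + b := by ring
        have e2 : inc + (b + 1) = inc + b + 1 := by ring
        rw [e1, e2]
        ring
      · by_cases h3 : c = '#'
        · subst h3
          simp only [pvRef, pvR, h1, h2, if_false, if_pos]
          rw [ih (i + 1) 0 0]
          have e1 : n - (i + 1) + 0 + 0 = n - i + inc + b - (inc + b) - 1 := by ring
          rw [e1]
          norm_num
        · simp only [pvRef, pvR, h1, h2, h3, if_false]
          rw [ih (i + 1) inc (b + 1)]
          have e1 : n - (i + 1) + inc + (b + 1) = n - i + inc + b := by ring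
          have e2 : inc + (b + 1) = inc + b + 1 := by ring
          rw [e1, e2]

-- one column: A's scan equals B's split-and-sum
theorem pv_col (col : String) (t : Int) :
    ((PySem.List.enumerate col.toList).foldl (fun (st : Int × Int) ic =>
        let load : Int := PySem.Str.len col - ic.1
        if ic.2 = '.' then (st.1, st.2 + 1)
        else if ic.2 = 'O' then (st.1 + load + st.2, st.2)
        else if ic.2 = '#' then (st.1, 0)
        else st) (t, 0)).1
      = (((PySem.Str.split? col "#").getD []).foldl (fun (st : Int × Int) seg =>
          let p := seg.toList.foldl (fun (p : Int × Int) c =>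
              if c ≠ '.' then
                (if c = 'O' then (p.1 + (st.2 - p.2), p.2 + 1) else (p.1, p.2 + 1))
              else p)
            (st.1, 0)
          (p.1, st.2 - (PySem.Str.len seg + 1)))
        (t, PySem.Str.len col)).1 := by
  have hs : PySem.Str.split? col "#" = some ((PySem.Chars.splitOn col.toList ['#']).map String.ofList) := by
    simp [PySem.Str.split?, PySem.Chars.split?]
  rw [hs]
  have hb : (((PySem.Chars.splitOn col.toList ['#']).map String.ofList).foldl (fun (st : Int × Int) seg =>
          let p := seg.toList.foldl (fun (p : Int × Int) c =>
              if c ≠ '.' then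
                (if c = 'O' then (p.1 + (st.2 - p.2), p.2 + 1) else (p.1, p.2 + 1))
              else p)
            (st.1, 0)
          (p.1, st.2 - (PySem.Str.len seg + 1)))
        (t, PySem.Str.len col))
      = pvSegs (PySem.Chars.splitOn col.toList ['#']) (t, PySem.Str.len col) := by
    rw [List.foldl_map]
    simp only [pvSegs]
    congr 1
    funext st seg
    simp [PySem.Str.len]
  rw [Option.getD_some, hb, pv_splitOn, pvA_fold]
  rw [pvB_fold col.toList [] t (PySem.Str.len col)]
  simp only [List.reverse_nil, List.foldl_nil, List.length_nil]
  rw [pv_bridge (PySem.Str.len col) col.toList 0 0 0]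
  norm_num

theorem pv_outer (platform : List String) : ∀ (t : Int),
    platform.foldl (fun total vertical =>
      ((PySem.List.enumerate vertical.toList).foldl (fun (st : Int × Int) ic =>
          let load : Int := PySem.Str.len vertical - ic.1
          if ic.2 = '.' then (st.1, st.2 + 1)
          else if ic.2 = 'O' then (st.1 + load + st.2, st.2)
          else if ic.2 = '#' then (st.1, 0)
          else st) (total, 0)).1) t
    = platform.foldl (fun total col =>
        (((PySem.Str.split? col "#").getD []).foldl (fun (st : Int × Int) seg =>
            let p := seg.toList.foldl (fun (p : Int × Int) c =>
                if c ≠ '.' then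
                  (if c = 'O' then (p.1 + (st.2 - p.2), p.2 + 1) else (p.1, p.2 + 1))
                else p)
              (st.1, 0)
            (p.1, st.2 - (PySem.Str.len seg + 1)))
          (total, PySem.Str.len col)).1) t := by
  induction platform with
  | nil => intro t; rfl
  | cons s l ih => intro t; simp only [List.foldl_cons, pv_col s t, ih]

-- ===== VERDICT (by name: the statement is the Claim_ definition above) =====
theorem calculate_load_dynamic_py_spec : Claim_equal_calculate_load_dynamic_py := by
  intro platform _
  unfold Spec_calculate_load_dynamic_py calculate_load_dynamic_py calculate_load_dynamic_py_alt
  exact pv_outer platform 0
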